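-- pv_equiv track=rewrite | github.com/MykutaSuprun/Course | Lection 8.py | cats_with_hats
-- ===== SOURCE A (Python) =====
-- def cats_with_hats(num_cats):
--     hats = set()
--     for round_number in range(1,num_cats + 1):
--         for cat_number in range(1,num_cats + 1):
--             if cat_number % round_number == 0:
--                 if cat_number not in hats:
--                     hats.add(cat_number)
--                 else:
--                     hats.remove(cat_number)
--
--     return sorted(list(hats))
-- ===== SOURCE B (Python) =====
-- def cats_with_hats(num_cats):
--     squares = []
--     i = 1
--     while i * i <= num_cats:
--         squares.append(i * i)
--         i += 1
--     return squares
-- ===== Notes on version B (the rewrite author's own statement) =====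
-- stated objective: faster
-- what changed: Replaces the O(n^2) double loop of divisor toggles over a set with a direct O(sqrt(n)) enumeration of the perfect squares up to n (a cat keeps its hat iff its divisor count is odd, i.e. iff its number is a perfect square).
import Mathlib
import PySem

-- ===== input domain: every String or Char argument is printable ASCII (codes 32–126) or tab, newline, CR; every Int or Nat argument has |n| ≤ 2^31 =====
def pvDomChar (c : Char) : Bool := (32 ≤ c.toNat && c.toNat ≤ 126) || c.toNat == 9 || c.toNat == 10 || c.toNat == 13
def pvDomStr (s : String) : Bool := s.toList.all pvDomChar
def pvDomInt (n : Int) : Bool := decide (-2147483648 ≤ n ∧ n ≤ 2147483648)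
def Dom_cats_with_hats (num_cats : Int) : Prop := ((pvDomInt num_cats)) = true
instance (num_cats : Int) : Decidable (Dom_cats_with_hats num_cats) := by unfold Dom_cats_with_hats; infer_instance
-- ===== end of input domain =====

-- B replaces A's O(n^2) double loop of divisor toggles with a direct enumeration of the
-- perfect squares up to n (a cat keeps its hat iff its number has an odd divisor count,
-- i.e. is a perfect square).

-- ===== PORT A =====
def cats_with_hats (num_cats : Int) : List Int :=
  let hats : PySem.Set Int :=
    (PySem.List.pyRange 1 (num_cats + 1) 1).foldl (fun hats round_number =>
      (PySem.List.pyRange 1 (num_cats + 1) 1).foldl (fun hats cat_number =>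
        if PySem.Int.mod cat_number round_number == 0 then
          if !(PySem.Set.contains hats cat_number) then
            PySem.Set.add hats cat_number
          else
            -- cat_number ∈ hats in this branch, so Python's remove cannot raise;
            -- .getD hats only totalises the Option
            (PySem.Set.remove? hats cat_number).getD hats
        else hats) hats) PySem.Set.empty
  PySem.List.sorted hats (fun x => x) false

-- ===== PORT B =====
-- termination helper for the while-loop bound (cited by altLoop's decreasing_by)
theorem pv_le_of_sq_le (i n : Int) (h : i * i ≤ n) : i ≤ n := by
  rcases (by omega : i ≤ 0 ∨ 0 < i) with h0 | h0
  · exact h0.trans (le_trans (mul_self_nonneg i) h)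
  · have h1 : i * 1 ≤ i * i := mul_le_mul_of_nonneg_left (by omega) h0.le
    omega

-- the 'while i * i <= num_cats' loop of Source B
def altLoop (num_cats i : Int) : List Int :=
  if h : i * i ≤ num_cats then (i * i) :: altLoop num_cats (i + 1) else []
termination_by (num_cats + 1 - i).toNat
decreasing_by
  have h2 : i ≤ num_cats := pv_le_of_sq_le i num_cats h
  omega

def cats_with_hats_alt (num_cats : Int) : List Int := altLoop num_cats 1

-- ===== PRECONDITION & SPEC =====
def Spec_cats_with_hats (num_cats : Int) (out : List Int) : Prop := out = cats_with_hats_alt num_cats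
instance (num_cats : Int) (out : List Int) : Decidable (Spec_cats_with_hats num_cats out) := by unfold Spec_cats_with_hats; infer_instance

-- ===== CLAIM (what is proved, stated in full; the proofs are below) =====
def Claim_equal_cats_with_hats : Prop := ∀ (num_cats : Int), Dom_cats_with_hats num_cats → Spec_cats_with_hats num_cats (cats_with_hats num_cats)

-- ===== LEMMAS AND PROOFS =====

-- the inner loop body of A's port, for a fixed round r
def catStep (r : Int) (s : PySem.Set Int) (k : Int) : PySem.Set Int :=
  if PySem.Int.mod k r == 0 then
    if !(PySem.Set.contains s k) then PySem.Set.add s k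
    else (PySem.Set.remove? s k).getD s
  else s

theorem nodup_catStep (r : Int) (s : PySem.Set Int) (k : Int) (hs : s.Nodup) :
    (catStep r s k).Nodup := by
  unfold catStep
  split_ifs with h1 h2
  · exact PySem.Set.nodup_add s k hs
  · rw [PySem.Set.remove?_of_mem (by simpa [PySem.Set.contains_iff] using h2)]
    exact PySem.Set.nodup_discard s k hs
  · exact hs

theorem mem_catStep (r : Int) (s : PySem.Set Int) (k y : Int) (hs : s.Nodup) :
    (y ∈ catStep r s k) ↔ (if y = k ∧ r ∣ k then y ∉ s else y ∈ s) := by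
  unfold catStep
  have hmod : (PySem.Int.mod k r == 0) = true ↔ r ∣ k := by
    simp [PySem.Int.mod_eq_zero_iff_dvd]
  split_ifs with h1 h2 h3 h3 <;>
    simp_all [PySem.Set.remove?_of_mem, PySem.Set.mem_discard]

theorem nodup_foldl_catStep (r : Int) (ks : List Int) (s : PySem.Set Int) (hs : s.Nodup) :
    (ks.foldl (catStep r) s).Nodup := by
  induction ks generalizing s with
  | nil => exact hs
  | cons k tl ih => exact ih _ (nodup_catStep r s k hs)

theorem mem_foldl_catStep (r : Int) (ks : List Int) (s : PySem.Set Int) (y : Int) (hs : s.Nodup) :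
    (y ∈ ks.foldl (catStep r) s) ↔ Xor' (y ∈ s) (r ∣ y ∧ Odd (ks.count y)) := by
  induction ks generalizing s with
  | nil => simp [Xor', List.count_nil]
  | cons k tl ih =>
    rw [List.foldl_cons, ih _ (nodup_catStep r s k hs), mem_catStep r s k y hs]
    by_cases hyk : y = k
    · subst hyk
      by_cases hd : r ∣ y <;>
        simp [hd, Nat.odd_add_one, Xor'] <;> tauto
    · have hky : ¬ k = y := fun h => hyk h.symm
      simp [hyk, hky, Xor']

theorem nodup_hats (rs ks : List Int) (s : PySem.Set Int) (hs : s.Nodup) :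
    (rs.foldl (fun s r => ks.foldl (catStep r) s) s).Nodup := by
  induction rs generalizing s with
  | nil => exact hs
  | cons r tl ih => exact ih _ (nodup_foldl_catStep r ks s hs)

theorem mem_foldl_rounds (n : Int) (rs : List Int) (s : PySem.Set Int) (y : Int) (hs : s.Nodup) :
    (y ∈ rs.foldl (fun s r => (PySem.List.pyRange 1 (n + 1) 1).foldl (catStep r) s) s) ↔
      Xor' (y ∈ s) (1 ≤ y ∧ y ≤ n ∧ Odd (rs.countP (fun r => decide (r ∣ y)))) := by
  induction rs generalizing s with
  | nil => simp [Xor']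
  | cons r tl ih =>
    rw [List.foldl_cons, ih _ (nodup_foldl_catStep r _ s hs),
      mem_foldl_catStep r _ s y hs]
    have hcount : (PySem.List.pyRange 1 (n + 1) 1).count y = if 1 ≤ y ∧ y ≤ n then 1 else 0 := by
      split_ifs with h
      · exact List.count_eq_one_of_mem (PySem.List.nodup_pyRange_one 1 (n + 1))
          (by rw [PySem.List.mem_pyRange_one]; omega)
      · exact List.count_eq_zero_of_not_mem
          (by rw [PySem.List.mem_pyRange_one]; omega)
    rw [hcount, List.countP_cons]
    by_cases hr : r ∣ y <;> by_cases hy : 1 ≤ y ∧ y ≤ n <;>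
      simp [hr, hy, Xor', Nat.odd_add_one] <;> tauto

-- divisor count over range 1..n equals over 1..y (divisors of y are ≤ y) for 1 ≤ y ≤ n
theorem countP_divisors_trunc (n y : Int) (h1 : 1 ≤ y) (h2 : y ≤ n) :
    (PySem.List.pyRange 1 (n + 1) 1).countP (fun r => decide (r ∣ y)) =
      (PySem.List.pyRange 1 (y + 1) 1).countP (fun r => decide (r ∣ y)) := by
  rw [PySem.List.pyRange_one_append 1 (y + 1) (n + 1) (by omega) (by omega),
    List.countP_append]
  have hz : (PySem.List.pyRange (y + 1) (n + 1) 1).countP (fun r => decide (r ∣ y)) = 0 := by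
    rw [List.countP_eq_zero]
    intro r hr
    rw [PySem.List.mem_pyRange_one] at hr
    simp only [decide_eq_true_eq]
    intro hdvd
    have := Int.le_of_dvd (by omega) hdvd
    omega
  omega

-- parity of the divisor count of a positive natural is odd iff it is a perfect square
theorem odd_card_divisors_iff (m : ℕ) (hm : 1 ≤ m) :
    Odd m.divisors.card ↔ ∃ j : ℕ, j * j = m := by
  classical
  have hm0 : m ≠ 0 := by omega
  have hsplit : m.divisors.card =
      (m.divisors.filter (fun d => d * d < m)).card +
        ((m.divisors.filter (fun d => ¬ d * d < m ∧ d * d = m)).card +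
          (m.divisors.filter (fun d => ¬ d * d < m ∧ ¬ d * d = m)).card) := by
    rw [← Finset.card_filter_add_card_filter_not (s := m.divisors) (p := fun d => d * d < m)]
    congr 1
    rw [← Finset.card_filter_add_card_filter_not
      (s := m.divisors.filter (fun d => ¬ d * d < m)) (p := fun d => d * d = m)]
    rw [Finset.filter_filter, Finset.filter_filter]
  have hSL : (m.divisors.filter (fun d => d * d < m)).card =
      (m.divisors.filter (fun d => ¬ d * d < m ∧ ¬ d * d = m)).card := by
    apply Finset.card_nbij' (i := fun d => m / d) (j := fun d => m / d)
    · intro d hd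
      simp only [Finset.mem_coe, Finset.mem_filter, Nat.mem_divisors] at hd ⊢
      obtain ⟨⟨hdvd, -⟩, hlt⟩ := hd
      have hd0 : 0 < d := Nat.pos_of_dvd_of_pos hdvd hm
      have hmul : d * (m / d) = m := Nat.mul_div_cancel' hdvd
      have hlt2 : d < m / d := by nlinarith
      refine ⟨⟨Nat.div_dvd_of_dvd hdvd, hm0⟩, ?_, ?_⟩ <;> nlinarith
    · intro d hd
      simp only [Finset.mem_coe, Finset.mem_filter, Nat.mem_divisors] at hd ⊢
      obtain ⟨⟨hdvd, -⟩, hnlt, hne⟩ := hd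
      have hd0 : 0 < d := Nat.pos_of_dvd_of_pos hdvd hm
      have hmul : d * (m / d) = m := Nat.mul_div_cancel' hdvd
      have hgt : m < d * d := by omega
      have hlt2 : m / d < d := by nlinarith
      refine ⟨⟨Nat.div_dvd_of_dvd hdvd, hm0⟩, by nlinarith⟩
    · intro d hd
      simp only [Finset.mem_coe, Finset.mem_filter, Nat.mem_divisors] at hd
      exact Nat.div_div_self hd.1.1 hm0
    · intro d hd
      simp only [Finset.mem_coe, Finset.mem_filter, Nat.mem_divisors] at hd
      exact Nat.div_div_self hd.1.1 hm0
  have hMcard : (m.divisors.filter (fun d => ¬ d * d < m ∧ d * d = m)).card =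
      if ∃ j : ℕ, j * j = m then 1 else 0 := by
    split_ifs with h
    · obtain ⟨j, hj⟩ := h
      have hj0 : 0 < j := by nlinarith
      rw [Finset.card_eq_one]
      refine ⟨j, ?_⟩
      ext e
      simp only [Finset.mem_filter, Nat.mem_divisors, Finset.mem_singleton]
      constructor
      · rintro ⟨-, -, he⟩
        nlinarith [Nat.mul_self_inj.mp (he.trans hj.symm)]
      · intro he
        rw [he]
        exact ⟨⟨⟨j, hj.symm⟩, hm0⟩, by omega, hj⟩
    · rw [Finset.card_eq_zero]
      ext e
      simp only [Finset.mem_filter, Finset.notMem_empty, iff_false]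
      rintro ⟨-, -, he⟩
      exact h ⟨e, he⟩
  constructor
  · intro hodd
    by_contra h
    rw [hMcard, if_neg h] at hsplit
    rw [hsplit, hSL, Nat.odd_iff] at hodd
    omega
  · intro h
    rw [hsplit, hSL, hMcard, if_pos h, Nat.odd_iff]
    omega

theorem countP_range_eq_card_divisors (m : ℕ) :
    ((List.range m).countP (fun k : ℕ => decide (((1 : ℤ) + (k : ℤ)) ∣ (m : ℤ)))) = m.divisors.card := by
  have hpred : ∀ k : ℕ, (decide (((1 : ℤ) + (k : ℤ)) ∣ (m : ℤ))) = decide ((1 + k) ∣ m) := by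
    intro k
    simp only [decide_eq_decide]
    rw [show ((1 : ℤ) + k) = ((1 + k : ℕ) : ℤ) by push_cast; ring]
    exact Int.natCast_dvd_natCast
  rw [show (fun k : ℕ => decide (((1 : ℤ) + (k : ℤ)) ∣ (m : ℤ))) = (fun k : ℕ => decide ((1 + k) ∣ m)) from funext hpred]
  rw [List.countP_eq_length_filter]
  rw [← List.toFinset_card_of_nodup (List.nodup_range.filter _)]
  rw [List.toFinset_filter, List.toFinset_range]
  rcases Nat.eq_zero_or_pos m with rfl | hm
  · simp
  · apply Finset.card_nbij' (i := fun k => k + 1) (j := fun d => d - 1)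
    · intro k hk
      simp only [Finset.mem_coe, Finset.mem_filter, Finset.mem_range, decide_eq_true_eq] at hk ⊢
      rw [Nat.mem_divisors]
      refine ⟨?_, by omega⟩
      have := hk.2
      rwa [Nat.add_comm] at this
    · intro d hd
      simp only [Finset.mem_coe, Finset.mem_filter, Finset.mem_range, decide_eq_true_eq] at hd ⊢
      rw [Nat.mem_divisors] at hd
      have hd1 : 1 ≤ d := Nat.pos_of_dvd_of_pos hd.1 hm
      have hdm : d ≤ m := Nat.le_of_dvd hm hd.1
      refine ⟨by omega, ?_⟩
      have : 1 + (d - 1) = d := by omega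
      rw [this]; exact hd.1
    · intro k hk; simp
    · intro d hd
      simp only [Finset.mem_coe, Nat.mem_divisors] at hd
      have hd1 : 1 ≤ d := Nat.pos_of_dvd_of_pos hd.1 hm
      simp; omega

theorem odd_countP_iff_square (n y : Int) (h1 : 1 ≤ y) (h2 : y ≤ n) :
    Odd ((PySem.List.pyRange 1 (n + 1) 1).countP (fun r => decide (r ∣ y))) ↔
      ∃ j : Int, 1 ≤ j ∧ j * j = y := by
  rw [countP_divisors_trunc n y h1 h2]
  obtain ⟨m, rfl⟩ : ∃ m : ℕ, (m : ℤ) = y := ⟨y.toNat, Int.toNat_of_nonneg (by omega)⟩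
  have hm : 1 ≤ m := by exact_mod_cast h1
  rw [PySem.List.pyRange_one]
  rw [show (((m : ℤ) + 1 - 1)).toNat = m by omega]
  rw [List.countP_map]
  rw [show ((fun r : ℤ => decide (r ∣ (m : ℤ))) ∘ (fun k : ℕ => (1 : ℤ) + (k : ℤ)))
      = (fun k : ℕ => decide (((1 : ℤ) + (k : ℤ)) ∣ (m : ℤ))) from rfl]
  rw [countP_range_eq_card_divisors m]
  rw [odd_card_divisors_iff m hm]
  constructor
  · rintro ⟨j, rfl⟩
    have hj : 1 ≤ j := by nlinarith
    exact ⟨(j : ℤ), by exact_mod_cast hj, by push_cast; ring⟩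
  · rintro ⟨j, hj1, hj2⟩
    refine ⟨j.toNat, ?_⟩
    have hcast : ((j.toNat : ℤ)) = j := Int.toNat_of_nonneg (by omega)
    have h3 : ((j.toNat * j.toNat : ℕ) : ℤ) = ((m : ℕ) : ℤ) := by
      push_cast
      rw [hcast, hj2]
    exact_mod_cast h3

-- A-side characterization
theorem mem_hats_iff (n y : Int) :
    (y ∈ (PySem.List.pyRange 1 (n + 1) 1).foldl
        (fun s r => (PySem.List.pyRange 1 (n + 1) 1).foldl (catStep r) s) PySem.Set.empty) ↔
      (1 ≤ y ∧ y ≤ n ∧ ∃ j : Int, 1 ≤ j ∧ j * j = y) := by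
  rw [mem_foldl_rounds n _ PySem.Set.empty y (show (PySem.Set.empty : PySem.Set Int).Nodup from List.nodup_nil)]
  have hempty : (y ∈ (PySem.Set.empty : PySem.Set Int)) ↔ False := by
    simp [PySem.Set.empty]
  rw [Xor']
  simp only [hempty, false_and, not_false_eq_true, and_true, false_or]
  constructor
  · rintro ⟨hy1, hy2, hodd⟩
    exact ⟨hy1, hy2, (odd_countP_iff_square n y hy1 hy2).1 hodd⟩
  · rintro ⟨hy1, hy2, hsq⟩
    exact ⟨hy1, hy2, (odd_countP_iff_square n y hy1 hy2).2 hsq⟩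

-- B-side characterization
theorem mem_altLoop (n i y : Int) (hi : 1 ≤ i) :
    y ∈ altLoop n i ↔ ∃ j : Int, i ≤ j ∧ j * j = y ∧ y ≤ n := by
  by_cases h : i * i ≤ n
  · rw [altLoop, dif_pos h, List.mem_cons, mem_altLoop n (i + 1) y (by omega)]
    constructor
    · rintro (rfl | ⟨j, hj1, hj2, hj3⟩)
      · exact ⟨i, le_rfl, rfl, h⟩
      · exact ⟨j, by omega, hj2, hj3⟩
    · rintro ⟨j, hj1, rfl, hy⟩
      by_cases hji : j = i
      · subst hji; left; rfl
      · right; exact ⟨j, by omega, rfl, hy⟩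
  · rw [altLoop, dif_neg h]
    simp only [List.not_mem_nil, false_iff]
    rintro ⟨j, hj1, rfl, hy⟩
    have : i * i ≤ j * j := by nlinarith
    omega
termination_by (n + 1 - i).toNat
decreasing_by
  have h2 : i ≤ n := pv_le_of_sq_le i n h
  omega

theorem pairwise_altLoop (n i : Int) (hi : 1 ≤ i) :
    (altLoop n i).Pairwise (· < ·) := by
  by_cases h : i * i ≤ n
  · rw [altLoop, dif_pos h]
    refine List.Pairwise.cons ?_ (pairwise_altLoop n (i + 1) (by omega))
    intro y hy
    obtain ⟨j, hj1, rfl, -⟩ := (mem_altLoop n (i + 1) y (by omega)).1 hy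
    nlinarith
  · rw [altLoop, dif_neg h]; exact List.Pairwise.nil
termination_by (n + 1 - i).toNat
decreasing_by
  have h2 : i ≤ n := pv_le_of_sq_le i n h
  omega

-- ===== VERDICT (by name: the statement is the Claim_ definition above) =====
theorem cats_with_hats_spec : Claim_equal_cats_with_hats := by
  intro n _
  unfold Spec_cats_with_hats cats_with_hats cats_with_hats_alt
  have hndB : (altLoop n 1).Nodup := (pairwise_altLoop n 1 le_rfl).imp ne_of_lt
  show PySem.List.sorted
      ((PySem.List.pyRange 1 (n + 1) 1).foldl
        (fun s r => (PySem.List.pyRange 1 (n + 1) 1).foldl (catStep r) s) PySem.Set.empty)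
      (fun x => x) false = altLoop n 1
  apply PySem.List.sorted_eq_of_perm_of_pairwise_lt
  · rw [List.perm_ext_iff_of_nodup hndB
      (nodup_hats (PySem.List.pyRange 1 (n + 1) 1) (PySem.List.pyRange 1 (n + 1) 1)
        PySem.Set.empty List.nodup_nil)]
    intro y
    rw [mem_altLoop n 1 y le_rfl, mem_hats_iff n y]
    constructor
    · rintro ⟨j, hj1, rfl, hy⟩
      exact ⟨by nlinarith, hy, j, hj1, rfl⟩
    · rintro ⟨hy1, hy2, j, hj1, rfl⟩
      exact ⟨j, hj1, rfl, hy2⟩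
  · exact pairwise_altLoop n 1 le_rfl
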